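-- pv_equiv track=rewrite | github.com/jero98772/toma_nota | clases/clase#_12__otros__2020-05-22/algunos_test/tests_hackido/momento2dias.py | diasXmes
-- ===== SOURCE A (Python) =====
-- def diasXmes(mes):
-- 	esMesesCon31dias = [True,False,True,False,True,False,True,True,False,True,False,True]
-- 	dias = 0
-- 	for i,j in zip(esMesesCon31dias,range(int(mes-1))):
-- 		if i:
-- 			dias += 31
-- 		elif j == 1:
-- 			dias += 28
-- 		else:
-- 			dias += 30
-- 	return dias
-- ===== SOURCE B (Python) =====
-- _CUM = [0, 31, 59, 90, 120, 151, 181, 212, 243, 273, 304, 334, 365]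
--
-- def diasXmes(mes):
--     n = int(mes - 1)
--     return _CUM[min(max(n, 0), 12)]
-- ===== Notes on version B (the rewrite author's own statement) =====
-- stated objective: simpler
-- what changed: Replaced the per-call loop over month flags with a precomputed cumulative-days table indexed by the clamped month index.
import Mathlib
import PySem

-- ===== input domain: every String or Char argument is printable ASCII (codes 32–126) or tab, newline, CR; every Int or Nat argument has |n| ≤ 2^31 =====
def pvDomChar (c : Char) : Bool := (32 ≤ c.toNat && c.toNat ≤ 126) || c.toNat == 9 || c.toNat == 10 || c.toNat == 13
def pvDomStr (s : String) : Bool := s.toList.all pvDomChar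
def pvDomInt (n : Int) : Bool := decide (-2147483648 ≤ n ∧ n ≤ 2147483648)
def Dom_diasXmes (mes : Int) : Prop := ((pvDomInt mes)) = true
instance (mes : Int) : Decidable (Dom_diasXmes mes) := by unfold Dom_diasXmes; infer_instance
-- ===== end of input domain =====

-- B replaces A's per-call accumulation loop by a constant cumulative-days table
-- indexed by the clamped month index (objective: simpler).

-- ===== PORT A =====
def diasXmes (mes : Int) : Int :=
  let esMesesCon31dias := [true,false,true,false,true,false,true,true,false,true,false,true]
  -- Python's zip is LAZY: range(int(mes-1)) is consumed only up to the 12 elements of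
  -- esMesesCon31dias, so the materialized range is bounded by min (mes-1) 12 — exact,
  -- since zip truncates to the shorter sequence anyway.
  (esMesesCon31dias.zip (PySem.List.pyRange 0 (min (mes - 1) 12) 1)).foldl
    (fun dias ij => if ij.1 then dias + 31 else if ij.2 == 1 then dias + 28 else dias + 30) 0

-- ===== PORT B =====
def diasXmes_alt (mes : Int) : Int :=
  let cum : List Int := [0, 31, 59, 90, 120, 151, 181, 212, 243, 273, 304, 334, 365]
  let n : Int := mes - 1
  -- index clamped to [0,12], so .toNat is exact and the lookup never misses
  cum.getD (min (max n 0) 12).toNat 0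

-- ===== PRECONDITION & SPEC =====
def Spec_diasXmes (mes : Int) (out : Int) : Prop := out = diasXmes_alt mes
instance (mes : Int) (out : Int) : Decidable (Spec_diasXmes mes out) := by unfold Spec_diasXmes; infer_instance

-- ===== CLAIM (what is proved, stated in full; the proofs are below) =====
def Claim_equal_diasXmes : Prop := ∀ (mes : Int), Dom_diasXmes mes → Spec_diasXmes mes (diasXmes mes)

-- ===== LEMMAS AND PROOFS =====

lemma diasXmes_eq (mes : Int) : diasXmes mes = diasXmes_alt mes := by
  by_cases h : mes ≤ 1
  · -- empty range: A = 0; B's clamped index is 0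
    have hr : PySem.List.pyRange 0 (min (mes - 1) 12) 1 = [] :=
      PySem.List.pyRange_one_eq_nil (by omega)
    have hmax : max (mes - 1) 0 = 0 := by omega
    simp [diasXmes, diasXmes_alt, hr, hmax]
  · by_cases h13 : mes ≤ 13
    · push_neg at h
      interval_cases mes <;> decide
    · push_neg at h h13
      -- mes ≥ 14: the range bound saturates at 12
      have hr : min (mes - 1) 12 = 12 := by omega
      have hmin : min (max (mes - 1) 0) 12 = 12 := by omega
      have h12 : PySem.List.pyRange 0 12 1 = [0,1,2,3,4,5,6,7,8,9,10,11] := by decide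
      simp [diasXmes, diasXmes_alt, hr, h12, hmin, List.zip, List.zipWith]

-- ===== VERDICT (by name: the statement is the Claim_ definition above) =====
theorem diasXmes_spec : Claim_equal_diasXmes := by
  intro mes _
  exact diasXmes_eq mes
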